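-- pv_equiv track=rewrite | github.com/shree-elamathi/python-programs | geeksforgeeks/max_difference.py | maxAbsDifference
-- ===== SOURCE A (Python) =====
-- def maxAbsDifference(arr):
--     n = len(arr)
--
--     # Arrays to store the nearest smaller elements on the left and right
--     left_smaller = [0] * n
--     right_smaller = [0] * n
--
--     # Stack to find nearest smaller to the left
--     stack = []
--
--     for i in range(n):
--         while stack and stack[-1] >= arr[i]:
--             stack.pop()
--         left_smaller[i] = stack[-1] if stack else 0
--         stack.append(arr[i])
--
--     # Clear the stack to reuse for finding nearest smaller to the right
--     stack.clear()
--
--     for i in range(n - 1, -1, -1):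
--         while stack and stack[-1] >= arr[i]:
--             stack.pop()
--         right_smaller[i] = stack[-1] if stack else 0
--         stack.append(arr[i])
--
--     # Calculate the maximum absolute difference
--     max_difference = 0
--     for i in range(n):
--         max_difference = max(max_difference, abs(left_smaller[i] - right_smaller[i]))
--
--     return max_difference
-- ===== SOURCE B (Python) =====
-- def maxAbsDifference(arr):
--     n = len(arr)
--     best = 0
--     for i in range(n):
--         left = 0
--         for j in range(i - 1, -1, -1):
--             if arr[j] < arr[i]:
--                 left = arr[j]
--                 break
--         right = 0
--         for j in range(i + 1, n):
--             if arr[j] < arr[i]: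
--                 right = arr[j]
--                 break
--         best = max(best, abs(left - right))
--     return best
-- ===== Notes on version B (the rewrite author's own statement) =====
-- stated objective: alternative
-- what changed: Replaces the two monotonic-stack passes and auxiliary arrays with direct nested backward/forward scans that find each nearest strictly smaller neighbour on the spot.
import Mathlib
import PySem

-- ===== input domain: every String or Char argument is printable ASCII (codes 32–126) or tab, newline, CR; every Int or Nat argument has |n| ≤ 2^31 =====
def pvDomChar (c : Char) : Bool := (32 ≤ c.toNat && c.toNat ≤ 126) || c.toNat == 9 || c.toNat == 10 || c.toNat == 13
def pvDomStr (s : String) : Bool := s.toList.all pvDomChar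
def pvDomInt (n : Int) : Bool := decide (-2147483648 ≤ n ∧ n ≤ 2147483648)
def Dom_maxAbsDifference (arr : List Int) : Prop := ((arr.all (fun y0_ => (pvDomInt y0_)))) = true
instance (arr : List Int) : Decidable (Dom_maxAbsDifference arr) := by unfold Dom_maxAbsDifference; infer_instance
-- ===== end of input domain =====

-- B replaces A's two monotonic-stack passes with direct nested backward/forward scans (alternative decomposition, not faster).

-- ===== PORT A =====
-- `while stack and stack[-1] >= arr[i]: stack.pop()` (stack head = Python list end / top)
def pvPop (x : Int) : List Int → List Int
  | [] => []
  | t :: rest => if x ≤ t then pvPop x rest else t :: rest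

-- one stack pass: for each element, pop ≥ it, record `stack[-1] if stack else 0`, push it
def pvPass (stack : List Int) : List Int → List Int
  | [] => []
  | a :: rest =>
    let s := pvPop a stack
    s.headD 0 :: pvPass (a :: s) rest

def maxAbsDifference (arr : List Int) : Int :=
  let left_smaller := pvPass [] arr
  let right_smaller := (pvPass [] arr.reverse).reverse
  (left_smaller.zip right_smaller).foldl (fun m lr => max m |lr.1 - lr.2|) 0

-- ===== PORT B =====
-- inner scan: first element of the list strictly smaller than x, else 0
def pvScan (x : Int) : List Int → Int
  | [] => 0
  | a :: rest => if a < x then a else pvScan x rest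

-- outer loop over i, keeping the reversed prefix (elements at i-1, i-2, …) and the suffix
def pvGo (best : Int) (pre : List Int) : List Int → Int
  | [] => best
  | a :: suf => pvGo (max best |pvScan a pre - pvScan a suf|) (a :: pre) suf

def maxAbsDifference_alt (arr : List Int) : Int := pvGo 0 [] arr

-- ===== PRECONDITION & SPEC =====
def Spec_maxAbsDifference (arr : List Int) (out : Int) : Prop := out = maxAbsDifference_alt arr
instance (arr : List Int) (out : Int) : Decidable (Spec_maxAbsDifference arr out) := by unfold Spec_maxAbsDifference; infer_instance

-- ===== CLAIM (what is proved, stated in full; the proofs are below) =====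
def Claim_equal_maxAbsDifference : Prop := ∀ (arr : List Int), Dom_maxAbsDifference arr → Spec_maxAbsDifference arr (maxAbsDifference arr)

-- ===== LEMMAS AND PROOFS =====

-- nearest-smaller values expressed via B's scan, left pass (pre = reversed processed prefix)
def bL (pre : List Int) : List Int → List Int
  | [] => []
  | a :: rest => pvScan a pre :: bL (a :: pre) rest

-- nearest strictly smaller to the right, for each position
def bR : List Int → List Int
  | [] => []
  | a :: rest => pvScan a rest :: bR rest

-- stack invariant: popping everything ≥ x leaves, on top, the first element < x of the reversed prefix
def StackInv (p s : List Int) : Prop := ∀ x : Int, (pvPop x s).headD 0 = pvScan x p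

lemma pvPop_pvPop {x a : Int} (h : x ≤ a) : ∀ s : List Int, pvPop x (pvPop a s) = pvPop x s := by
  intro s
  induction s with
  | nil => rfl
  | cons t rest ih =>
    by_cases ht : a ≤ t
    · have hxt : x ≤ t := le_trans h ht
      simp [pvPop, ht, hxt, ih]
    · simp [pvPop, ht]

lemma stackInv_step {p s : List Int} (hInv : StackInv p s) (a : Int) : StackInv (a :: p) (a :: pvPop a s) := by
  intro x
  by_cases hax : a < x
  · have : ¬ x ≤ a := not_le.mpr hax
    simp [pvPop, pvScan, this, hax]
  · have hxa : x ≤ a := le_of_not_gt (by simpa using hax)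
    simpa [pvPop, pvScan, hxa, hax, pvPop_pvPop hxa, List.headD] using hInv x

lemma pass_eq : ∀ (rest p s : List Int), StackInv p s → pvPass s rest = bL p rest := by
  intro rest
  induction rest with
  | nil => intro p s _; rfl
  | cons a t ih =>
    intro p s hInv
    simp only [pvPass, bL, hInv a]
    exact congrArg _ (ih (a :: p) (a :: pvPop a s) (stackInv_step hInv a))

lemma stackInv_nil : StackInv [] [] := by intro x; rfl

lemma bL_append : ∀ (u : List Int) (p v : List Int), bL p (u ++ v) = bL p u ++ bL (u.reverse ++ p) v := by
  intro u
  induction u with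
  | nil => intro p v; simp [bL]
  | cons a t ih =>
    intro p v
    simp only [List.cons_append, bL, ih (a :: p) v, List.reverse_cons, List.append_assoc,
      List.singleton_append, List.nil_append]

lemma bL_rev : ∀ l : List Int, bL [] l.reverse = (bR l).reverse := by
  intro l
  induction l with
  | nil => rfl
  | cons a t ih =>
    simp only [List.reverse_cons, bL_append, ih, bR, List.reverse_cons, List.reverse_reverse,
      List.append_nil, bL]

lemma zip_fold : ∀ (rest pre : List Int) (best : Int),
    ((bL pre rest).zip (bR rest)).foldl (fun m lr => max m |lr.1 - lr.2|) best = pvGo best pre rest := by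
  intro rest
  induction rest with
  | nil => intro pre best; rfl
  | cons a t ih =>
    intro pre best
    simp only [bL, bR, List.zip_cons_cons, List.foldl_cons, pvGo, ih (a :: pre)]

-- ===== VERDICT (by name: the statement is the Claim_ definition above) =====
theorem maxAbsDifference_spec : Claim_equal_maxAbsDifference := by
  intro arr _
  show maxAbsDifference arr = maxAbsDifference_alt arr
  unfold maxAbsDifference maxAbsDifference_alt
  rw [pass_eq arr [] [] stackInv_nil, pass_eq arr.reverse [] [] stackInv_nil, bL_rev,
    List.reverse_reverse, zip_fold]
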